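-- pv_equiv track=rewrite | github.com/ModSiming/EpiSiming | episiming/scenes.py | associa_pop_residencia
-- ===== SOURCE A (Python) =====
-- def associa_pop_residencia(res_tam, res_0=0, ind_0=0):
--     '''
--     Retorna uma lista com a residência de cada indivíduo
--     e uma lista com os indivíduos em cada residência.
--
--     Isso é feito a partir da lista do tamanho de cada residência.
--
--     A população é associada, por ordem de índice, a cada residência.
--     '''
--     pop_res = list() # índice da residência de cada indivíduo
--     res_pop = list() # índice dos indivíduos em cada residência
--     individuo = ind_0
--     residencia = res_0
--     for k in range(len(res_tam)):
--         pop_res += res_tam[k]*[residencia + k]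
--         res_pop.append(list(range(individuo, individuo + res_tam[k])))
--         individuo += res_tam[k]
--
--     return pop_res, res_pop
-- ===== SOURCE B (Python) =====
-- def associa_pop_residencia(res_tam, res_0=0, ind_0=0):
--     '''
--     Divide and conquer: split the size list in half, solve each half
--     independently (shifting the residence and individual start indices
--     for the right half), and concatenate the two partial answers.
--     '''
--     n = len(res_tam)
--     if n == 0:
--         return [], []
--     if n == 1:
--         t = res_tam[0]
--         return t * [res_0], [list(range(ind_0, ind_0 + t))]
--     m = n // 2
--     left = res_tam[:m]
--     pop_l, res_l = associa_pop_residencia(left, res_0, ind_0)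
--     pop_r, res_r = associa_pop_residencia(res_tam[m:], res_0 + m, ind_0 + sum(left))
--     return pop_l + pop_r, res_l + res_r
-- ===== Notes on version B (the rewrite author's own statement) =====
-- stated objective: alternative
-- what changed: Replaces A's single left-to-right running-offset loop with a divide-and-conquer recursion: the size list is split in half, each half is solved independently with shifted residence/individual start indices, and the two partial answers are concatenated.
import Mathlib
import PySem

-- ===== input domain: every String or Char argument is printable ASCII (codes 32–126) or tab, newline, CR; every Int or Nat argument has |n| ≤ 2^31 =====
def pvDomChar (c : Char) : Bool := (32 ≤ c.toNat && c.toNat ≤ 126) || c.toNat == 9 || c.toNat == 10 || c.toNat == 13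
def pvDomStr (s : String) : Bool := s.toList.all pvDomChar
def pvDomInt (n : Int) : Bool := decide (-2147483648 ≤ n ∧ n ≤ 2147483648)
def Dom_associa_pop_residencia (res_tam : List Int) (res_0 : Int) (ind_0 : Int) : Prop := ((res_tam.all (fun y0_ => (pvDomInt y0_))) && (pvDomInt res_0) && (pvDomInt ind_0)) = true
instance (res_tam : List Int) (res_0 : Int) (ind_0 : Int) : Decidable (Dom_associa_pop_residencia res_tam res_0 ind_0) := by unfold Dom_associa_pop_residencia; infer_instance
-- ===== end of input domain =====

-- B replaces A's single running-offset loop by a divide-and-conquer recursion on the size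
-- list (objective: alternative decomposition, same result).

-- ===== PORT A =====
-- literal port of A's loop: one pass over range(len(res_tam)) carrying
-- (pop_res, res_pop, individuo) as state
def associa_pop_residencia (res_tam : List Int) (res_0 : Int) (ind_0 : Int) : List Int × List (List Int) :=
  let st := (PySem.List.pyRange 0 res_tam.length 1).foldl
    (fun (st : List Int × List (List Int) × Int) k =>
      let t := PySem.List.pyGetD res_tam k 0
      (st.1 ++ PySem.List.pyRepeat [res_0 + k] t,
       st.2.1 ++ [PySem.List.pyRange st.2.2 (st.2.2 + t) 1],
       st.2.2 + t))
    ([], [], ind_0)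
  (st.1, st.2.1)

-- ===== PORT B =====
-- port of Source B's divide-and-conquer: res_tam[:m] / res_tam[m:] with 0 ≤ m ≤ len are
-- exactly List.take m / List.drop m; t*[res_0] = pyRepeat; list(range(a,b)) = pyRange.
def associa_pop_residencia_alt (res_tam : List Int) (res_0 : Int) (ind_0 : Int) : List Int × List (List Int) :=
  if h0 : res_tam.length = 0 then ([], [])
  else if h1 : res_tam.length = 1 then
    (PySem.List.pyRepeat [res_0] (res_tam.getD 0 0),
     [PySem.List.pyRange ind_0 (ind_0 + res_tam.getD 0 0) 1])
  else
    let m := res_tam.length / 2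
    let left := res_tam.take m
    let lres := associa_pop_residencia_alt left res_0 ind_0
    let rres := associa_pop_residencia_alt (res_tam.drop m) (res_0 + (m : Int)) (ind_0 + left.sum)
    (lres.1 ++ rres.1, lres.2 ++ rres.2)
termination_by res_tam.length
decreasing_by
  · simp [List.length_take]; omega
  · simp [List.length_drop]; omega

-- ===== PRECONDITION & SPEC =====
def Spec_associa_pop_residencia (res_tam : List Int) (res_0 : Int) (ind_0 : Int) (out : List Int × List (List Int)) : Prop := out = associa_pop_residencia_alt res_tam res_0 ind_0
instance (res_tam : List Int) (res_0 : Int) (ind_0 : Int) (out : List Int × List (List Int)) : Decidable (Spec_associa_pop_residencia res_tam res_0 ind_0 out) := by unfold Spec_associa_pop_residencia; infer_instance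

-- ===== CLAIM (what is proved, stated in full; the proofs are below) =====
def Claim_equal_associa_pop_residencia : Prop := ∀ (res_tam : List Int) (res_0 : Int) (ind_0 : Int), Dom_associa_pop_residencia res_tam res_0 ind_0 → Spec_associa_pop_residencia res_tam res_0 ind_0 (associa_pop_residencia res_tam res_0 ind_0)

-- ===== LEMMAS AND PROOFS =====

-- common structural reference: one residence at a time
def gRef (l : List Int) (r i : Int) : List Int × List (List Int) :=
  match l with
  | [] => ([], [])
  | t :: rest =>
    let g := gRef rest (r + 1) (i + t)
    (PySem.List.pyRepeat [r] t ++ g.1, PySem.List.pyRange i (i + t) 1 :: g.2)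

-- A's loop over enumerated sizes, with explicit accumulators, equals gRef
theorem loopA_eq (res_0 : Int) (l : List Int) :
    ∀ (s ind : Int) (pr : List Int) (rp : List (List Int)),
    (PySem.List.enumerate l s).foldl
      (fun (st : List Int × List (List Int) × Int) p =>
        (st.1 ++ PySem.List.pyRepeat [res_0 + p.1] p.2,
         st.2.1 ++ [PySem.List.pyRange st.2.2 (st.2.2 + p.2) 1],
         st.2.2 + p.2))
      (pr, rp, ind)
    = (pr ++ (gRef l (res_0 + s) ind).1, rp ++ (gRef l (res_0 + s) ind).2, ind + l.sum) := by
  induction l with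
  | nil => intro s ind pr rp; simp [PySem.List.enumerate, gRef]
  | cons t rest ih =>
    intro s ind pr rp
    rw [PySem.List.enumerate_cons]
    simp only [List.foldl_cons]
    rw [ih (s + 1) (ind + t) (pr ++ PySem.List.pyRepeat [res_0 + s] t)
        (rp ++ [PySem.List.pyRange ind (ind + t) 1])]
    simp only [gRef, Prod.mk.injEq, List.append_assoc, List.sum_cons]
    refine ⟨by rw [add_assoc], by rw [add_assoc]; simp, by ring⟩

-- gRef splits over list append
theorem gRef_append (xs ys : List Int) : ∀ (r i : Int),
    gRef (xs ++ ys) r i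
      = ((gRef xs r i).1 ++ (gRef ys (r + xs.length) (i + xs.sum)).1,
         (gRef xs r i).2 ++ (gRef ys (r + xs.length) (i + xs.sum)).2) := by
  induction xs with
  | nil => intro r i; simp [gRef]
  | cons t rest ih =>
    intro r i
    simp only [List.cons_append, gRef, ih (r + 1) (i + t), List.length_cons, List.sum_cons,
      List.append_assoc]
    have hr : r + ((rest.length + 1 : Nat) : Int) = r + 1 + rest.length := by push_cast; ring
    have hi : i + (t + rest.sum) = i + t + rest.sum := by ring
    rw [hr, hi]

-- B equals gRef, by strong induction on the length
theorem altB_eq (l : List Int) (r i : Int) :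
    associa_pop_residencia_alt l r i = gRef l r i := by
  induction hn : l.length using Nat.strong_induction_on generalizing l r i with
  | _ n ih =>
  subst hn
  unfold associa_pop_residencia_alt
  by_cases h0 : l.length = 0
  · rw [dif_pos h0, List.length_eq_zero_iff.mp h0]; rfl
  by_cases h1 : l.length = 1
  · rw [dif_neg h0, dif_pos h1]
    obtain ⟨t, ht⟩ := List.length_eq_one_iff.mp h1
    subst ht
    simp [gRef, PySem.List.pyRepeat]
  · rw [dif_neg h0, dif_neg h1]
    simp only []
    rw [ih _ (by simp [List.length_take]; omega) _ r i rfl,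
        ih _ (by simp [List.length_drop]; omega) _ _ _ rfl]
    have := gRef_append (l.take (l.length / 2)) (l.drop (l.length / 2)) r i
    rw [List.take_append_drop] at this
    rw [this, List.length_take_of_le (Nat.div_le_self _ _)]

-- ===== VERDICT (by name: the statement is the Claim_ definition above) =====
theorem associa_pop_residencia_spec : Claim_equal_associa_pop_residencia := by
  intro res_tam res_0 ind_0 _
  unfold Spec_associa_pop_residencia associa_pop_residencia
  rw [altB_eq]
  have hb : (PySem.List.pyRange 0 (res_tam.length : Int) 1).foldl
      (fun (st : List Int × List (List Int) × Int) k =>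
        (st.1 ++ PySem.List.pyRepeat [res_0 + k] (PySem.List.pyGetD res_tam k 0),
         st.2.1 ++ [PySem.List.pyRange st.2.2 (st.2.2 + PySem.List.pyGetD res_tam k 0) 1],
         st.2.2 + PySem.List.pyGetD res_tam k 0))
      ([], [], ind_0)
    = (PySem.List.enumerate res_tam 0).foldl
        (fun (st : List Int × List (List Int) × Int) p =>
          (st.1 ++ PySem.List.pyRepeat [res_0 + p.1] p.2,
           st.2.1 ++ [PySem.List.pyRange st.2.2 (st.2.2 + p.2) 1],
           st.2.2 + p.2))
        ([], [], ind_0) := by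
    rw [PySem.List.enumerate_eq_map_pyRange res_tam 0, List.foldl_map]
    rfl
  simp only []
  rw [hb, loopA_eq res_0 res_tam 0 ind_0 [] []]
  simp
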